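-- pv_equiv track=rewrite | github.com/YJ-EBD/MELAUHF-IOT | ABBAS_WEB/router/pages.py | _trash_name_part
-- ===== SOURCE A (Python) =====
-- def _trash_name_part(value: str, fallback: str) -> str:
--     src = " ".join(str(value or "").strip().split())
--     if not src:
--         src = fallback
--
--     out_chars: list[str] = []
--     for ch in src:
--         code = ord(ch)
--         if code < 32:
--             continue
--         if ch in '\\/:*?"<>|':
--             out_chars.append("_")
--         elif ch.isspace():
--             out_chars.append("_")
--         else:
--             out_chars.append(ch)
--
--     cleaned = "".join(out_chars).strip("._ ")
--     return cleaned or fallback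
-- ===== SOURCE B (Python) =====
-- # Alternative decomposition: instead of A's single per-character loop with
-- # ordered branches, iterate over the small forbidden alphabet and apply
-- # whole-string str.replace passes: control codes are deleted, then each
-- # forbidden character and the space is replaced by "_".
-- def _trash_name_part(value: str, fallback: str) -> str:
--     src = " ".join(str(value or "").strip().split())
--     if not src:
--         src = fallback
--     for code in range(32):
--         src = src.replace(chr(code), "")
--     for bad in '\\/:*?"<>| ':
--         src = src.replace(bad, "_")
--     cleaned = src.strip("._ ")
--     return cleaned or fallback
-- ===== Notes on version B (the rewrite author's own statement) =====
-- stated objective: alternative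
-- what changed: A scans the string once with a per-character branch chain (delete control, forbidden set to '_', isspace to '_'); B instead iterates over the small forbidden alphabet, applying a whole-string str.replace pass per character: 32 deletion passes for the control codes, then one substitution pass per forbidden character and the space.
import Mathlib
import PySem

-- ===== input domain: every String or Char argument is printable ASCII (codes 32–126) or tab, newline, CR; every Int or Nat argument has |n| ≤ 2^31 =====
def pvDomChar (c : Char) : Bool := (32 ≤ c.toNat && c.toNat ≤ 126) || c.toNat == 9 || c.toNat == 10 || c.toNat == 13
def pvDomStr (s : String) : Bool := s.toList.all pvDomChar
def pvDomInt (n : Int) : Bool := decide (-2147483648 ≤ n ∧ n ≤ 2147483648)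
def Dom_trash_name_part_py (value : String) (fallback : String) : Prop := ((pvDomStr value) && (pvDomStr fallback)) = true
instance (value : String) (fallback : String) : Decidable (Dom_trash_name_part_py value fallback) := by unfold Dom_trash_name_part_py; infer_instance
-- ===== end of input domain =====

-- B replaces A's single per-character branch loop by whole-string replace passes, one per forbidden character (alternative decomposition, same cost).


-- ===== PORT A =====
def trash_name_part_py (value : String) (fallback : String) : String :=
  let v := if value = "" then "" else value                -- str(value or "")
  let src := PySem.Chars.join [' '] (PySem.Chars.split₀ (PySem.Chars.strip v.toList))
  let src := if src.isEmpty then fallback.toList else src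
  let outChars := src.foldl (fun acc ch =>
      if ch.toNat < 32 then acc
      else if ['\\', '/', ':', '*', '?', '"', '<', '>', '|'].contains ch then acc ++ ['_']
      else if PySem.Chars.isspace ch then acc ++ ['_']
      else acc ++ [ch]) ([] : List Char)
  let cleaned := PySem.Chars.stripChars outChars ['.', '_', ' ']
  if cleaned.isEmpty then fallback else String.ofList cleaned

-- ===== PORT B =====
-- hand port of str.replace(old, new) for a ONE-character old: exact, since every
-- occurrence of the single character old is independent and replaced by new
def pyReplaceChar (s : List Char) (old : Char) (new : List Char) : List Char :=
  s.flatMap (fun c => if c = old then new else [c])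

def trash_name_part_py_alt (value : String) (fallback : String) : String :=
  let v := if value = "" then "" else value                -- str(value or "")
  let src := PySem.Chars.join [' '] (PySem.Chars.split₀ (PySem.Chars.strip v.toList))
  let src := if src.isEmpty then fallback.toList else src
  -- for code in range(32): src = src.replace(chr(code), "")
  let src := (PySem.List.pyRange 0 32 1).foldl (fun s code => pyReplaceChar s (Char.ofNat code.toNat) []) src
  -- for bad in '\\/:*?"<>| ': src = src.replace(bad, "_")
  let src := ['\\', '/', ':', '*', '?', '"', '<', '>', '|', ' '].foldl (fun s bad => pyReplaceChar s bad ['_']) src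
  let cleaned := PySem.Chars.stripChars src ['.', '_', ' ']
  if cleaned.isEmpty then fallback else String.ofList cleaned

-- ===== PRECONDITION & SPEC =====
def Spec_trash_name_part_py (value : String) (fallback : String) (out : String) : Prop := out = trash_name_part_py_alt value fallback
instance (value : String) (fallback : String) (out : String) : Decidable (Spec_trash_name_part_py value fallback out) := by unfold Spec_trash_name_part_py; infer_instance

-- ===== CLAIM (what is proved, stated in full; the proofs are below) =====
def Claim_equal_trash_name_part_py : Prop := ∀ (value : String) (fallback : String), Dom_trash_name_part_py value fallback → Spec_trash_name_part_py value fallback (trash_name_part_py value fallback)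

-- ===== LEMMAS AND PROOFS =====
set_option maxRecDepth 4000
set_option maxHeartbeats 1000000

-- the common per-character semantics both ports are reduced to
def pvTrashMap (ch : Char) : Option Char :=
  if ch.toNat < 32 then none
  else if ['\\', '/', ':', '*', '?', '"', '<', '>', '|', ' '].contains ch then some '_'
  else some ch

-- ---- A side ----

-- A's loop body agrees with pvTrashMap on every Dom character
theorem pv_step_eq (ch : Char) (h : pvDomChar ch = true) :
    (if ch.toNat < 32 then ([] : List Char)
     else if ['\\', '/', ':', '*', '?', '"', '<', '>', '|'].contains ch then ['_']
     else if PySem.Chars.isspace ch then ['_']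
     else [ch]) = (pvTrashMap ch).toList := by
  simp only [pvDomChar, Bool.or_eq_true, Bool.and_eq_true, beq_iff_eq, decide_eq_true_eq] at h
  unfold pvTrashMap
  by_cases h32 : ch.toNat < 32
  · simp only [h32, if_true, Option.toList]
  · have hle : ch.toNat ≤ 126 := by omega
    have hn32 : ch.toNat = 32 → ch = ' ' := by
      intro hn
      have hv : ch.val = (' ' : Char).val := by
        apply UInt32.toNat_inj.mp
        exact hn
      exact Char.ext hv
    have hsp : PySem.Chars.isspace ch = true ↔ ch = ' ' := by
      constructor
      · intro hs
        apply hn32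
        revert hs
        simp only [PySem.Chars.isspace, Bool.or_eq_true, Bool.and_eq_true, decide_eq_true_eq]
        omega
      · intro he; subst he; decide
    by_cases hf : ch ∈ ['\\', '/', ':', '*', '?', '"', '<', '>', '|']
    · have hf2 : ch ∈ ['\\', '/', ':', '*', '?', '"', '<', '>', '|', ' '] := by
        simp only [List.mem_cons] at hf ⊢; tauto
      simp [h32, hf, hf2]
    · by_cases he : ch = ' '
      · subst he; decide
      · have hf2 : ch ∉ ['\\', '/', ':', '*', '?', '"', '<', '>', '|', ' '] := by
          simp only [List.mem_cons] at hf ⊢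
          simp only [List.not_mem_nil, or_false] at hf
          tauto
        have hsp2 : PySem.Chars.isspace ch = false := by
          rw [← Bool.not_eq_true, hsp]; exact he
        simp [h32, hf, hf2, hsp2]

-- A's foldl over Dom characters is filterMap pvTrashMap
theorem pv_fold_eq (l : List Char) (acc : List Char) (h : ∀ c ∈ l, pvDomChar c = true) :
    l.foldl (fun acc ch =>
      if ch.toNat < 32 then acc
      else if ['\\', '/', ':', '*', '?', '"', '<', '>', '|'].contains ch then acc ++ ['_']
      else if PySem.Chars.isspace ch then acc ++ ['_']
      else acc ++ [ch]) acc = acc ++ l.filterMap pvTrashMap := by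
  induction l generalizing acc with
  | nil => simp
  | cons c rest ih =>
    have hc := h c (List.mem_cons_self)
    have hrest : ∀ x ∈ rest, pvDomChar x = true := fun x hx => h x (List.mem_cons_of_mem _ hx)
    have hacc : ∀ (a : List Char),
        (if c.toNat < 32 then a
         else if ['\\', '/', ':', '*', '?', '"', '<', '>', '|'].contains c then a ++ ['_']
         else if PySem.Chars.isspace c then a ++ ['_']
         else a ++ [c]) = a ++ (pvTrashMap c).toList := by
      intro a
      rw [← pv_step_eq c hc]
      split_ifs <;> simp
    simp only [List.foldl_cons, List.filterMap_cons]
    rw [hacc, ih _ hrest, List.append_assoc]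
    congr 1
    cases hm : pvTrashMap c <;> simp [Option.toList]

-- every character of split₀.go's output comes from the input, the current word or the accumulator
theorem pv_mem_split₀_go (s : List Char) (cur : List Char) (acc : List (List Char))
    (w : List Char) (hw : w ∈ PySem.Chars.split₀.go s cur acc) (c : Char) (hc : c ∈ w) :
    c ∈ s ∨ c ∈ cur ∨ ∃ u ∈ acc, c ∈ u := by
  induction s generalizing cur acc with
  | nil =>
    unfold PySem.Chars.split₀.go at hw
    by_cases hcur : cur.isEmpty
    · rw [if_pos hcur] at hw
      rw [List.mem_reverse] at hw
      right; right; exact ⟨w, hw, hc⟩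
    · rw [if_neg hcur] at hw
      rw [List.mem_reverse] at hw
      rcases List.mem_cons.mp hw with hw | hw
      · subst hw; right; left; simpa using hc
      · right; right; exact ⟨w, hw, hc⟩
  | cons a rest ih =>
    unfold PySem.Chars.split₀.go at hw
    split_ifs at hw with h1 h2
    · rcases ih _ _ hw with h | h | h
      · exact Or.inl (List.mem_cons_of_mem _ h)
      · simp at h
      · right; right; exact h
    · rcases ih _ _ hw with h | h | h
      · exact Or.inl (List.mem_cons_of_mem _ h)
      · simp at h
      · rcases h with ⟨u, hu, hcu⟩
        rcases List.mem_cons.mp hu with hu | hu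
        · subst hu; right; left; simpa using hcu
        · right; right; exact ⟨u, hu, hcu⟩
    · rcases ih _ _ hw with h | h | h
      · exact Or.inl (List.mem_cons_of_mem _ h)
      · rcases List.mem_cons.mp h with h | h
        · subst h; exact Or.inl List.mem_cons_self
        · right; left; exact h
      · right; right; exact h

theorem pv_mem_split₀ (s : List Char) (w : List Char) (hw : w ∈ PySem.Chars.split₀ s)
    (c : Char) (hc : c ∈ w) : c ∈ s := by
  rcases pv_mem_split₀_go s [] [] w hw c hc with h | h | h
  · exact h
  · simp at h
  · simp at h

theorem pv_mem_join (parts : List (List Char)) (c : Char)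
    (hc : c ∈ PySem.Chars.join [' '] parts) : c = ' ' ∨ ∃ w ∈ parts, c ∈ w := by
  induction parts with
  | nil => simp [PySem.Chars.join, List.intercalate] at hc
  | cons p rest ih =>
    cases rest with
    | nil =>
      simp [PySem.Chars.join, List.intercalate] at hc
      exact Or.inr ⟨p, by simp, hc⟩
    | cons q rest' =>
      rw [PySem.Chars.join_cons_cons] at hc
      simp only [List.append_assoc, List.mem_append, List.mem_singleton] at hc
      rcases hc with h | h | h
      · exact Or.inr ⟨p, by simp, h⟩
      · exact Or.inl h
      · rcases ih (by simpa using h) with h' | ⟨w, hw, hcw⟩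
        · exact Or.inl h'
        · exact Or.inr ⟨w, List.mem_cons_of_mem _ hw, hcw⟩

theorem pv_mem_strip (s : List Char) (c : Char) (hc : c ∈ PySem.Chars.strip s) : c ∈ s := by
  simp only [PySem.Chars.strip, PySem.Chars.rstrip, PySem.Chars.lstrip] at hc
  simp only [List.mem_reverse] at hc
  have h1 := (List.dropWhile_sublist (l := (List.dropWhile PySem.Chars.isspace s).reverse)
      (p := PySem.Chars.isspace)).mem hc
  simp only [List.mem_reverse] at h1
  exact (List.dropWhile_sublist _).mem h1

-- every character of the normalized source is a Dom character
theorem pv_src_dom (value fallback : String) (hdom : Dom_trash_name_part_py value fallback) :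
    ∀ c ∈ (let v := if value = "" then "" else value
           let src := PySem.Chars.join [' '] (PySem.Chars.split₀ (PySem.Chars.strip v.toList))
           if src.isEmpty then fallback.toList else src), pvDomChar c = true := by
  unfold Dom_trash_name_part_py pvDomStr at hdom
  simp only [Bool.and_eq_true, List.all_eq_true] at hdom
  intro c hc
  simp only at hc
  by_cases hv : value = ""
  · rw [if_pos hv] at hc
    rw [if_pos (by decide)] at hc
    exact hdom.2 c hc
  · rw [if_neg hv] at hc
    split_ifs at hc with h1
    · exact hdom.2 c hc
    · rcases pv_mem_join _ c hc with h | ⟨w, hw, hcw⟩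
      · subst h; decide
      · exact hdom.1 c (pv_mem_strip _ c (pv_mem_split₀ _ w hw c hcw))

-- ---- B side ----

-- deletion pass = filter
theorem pv_replace_del (s : List Char) (a : Char) :
    pyReplaceChar s a [] = s.filter (fun c => c ≠ a) := by
  induction s with
  | nil => rfl
  | cons c t ih =>
    simp only [pyReplaceChar, List.flatMap_cons, List.filter_cons] at ih ⊢
    by_cases h : c = a <;> simp [h, ih]

-- substitution pass = map
theorem pv_replace_sub (s : List Char) (a : Char) :
    pyReplaceChar s a ['_'] = s.map (fun c => if c = a then '_' else c) := by
  induction s with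
  | nil => rfl
  | cons c t ih =>
    simp only [pyReplaceChar, List.flatMap_cons, List.map_cons] at ih ⊢
    by_cases h : c = a <;> simp [h, ih]

-- fold of deletion passes = one filter with the conjunction of the predicates
theorem pv_fold_del (codes : List Char) (s : List Char) :
    codes.foldl (fun s a => pyReplaceChar s a []) s
      = s.filter (fun c => codes.all (fun a => c ≠ a)) := by
  induction codes generalizing s with
  | nil => simp
  | cons a rest ih =>
    simp only [List.foldl_cons]
    rw [pv_replace_del, ih, List.filter_filter]
    apply List.filter_congr
    intro c _
    simp [Bool.and_comm]

-- fold of substitution passes = one map of the folded substitution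
theorem pv_fold_sub (bads : List Char) (s : List Char) :
    bads.foldl (fun s a => pyReplaceChar s a ['_']) s
      = s.map (fun c => bads.foldl (fun x a => if x = a then '_' else x) c) := by
  induction bads generalizing s with
  | nil => simp
  | cons a rest ih =>
    simp only [List.foldl_cons]
    rw [pv_replace_sub, ih, List.map_map]
    rfl

theorem pv_subst_not_mem (bads : List Char) (c : Char) (h : c ∉ bads) :
    bads.foldl (fun x a => if x = a then '_' else x) c = c := by
  induction bads with
  | nil => rfl
  | cons a rest ih =>
    simp only [List.mem_cons, not_or] at h
    simp only [List.foldl_cons, if_neg h.1]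
    exact ih h.2

theorem pv_subst_mem (bads : List Char) (c : Char) (hu : '_' ∉ bads) (h : c ∈ bads) :
    bads.foldl (fun x a => if x = a then '_' else x) c = '_' := by
  induction bads with
  | nil => simp at h
  | cons a rest ih =>
    simp only [List.mem_cons, not_or] at hu
    simp only [List.foldl_cons]
    by_cases hca : c = a
    · rw [if_pos hca]
      exact pv_subst_not_mem rest '_' hu.2
    · rw [if_neg hca]
      rcases List.mem_cons.mp h with h' | h'
      · exact absurd h' hca
      · exact ih hu.2 h'

-- the 32 control characters, as chr maps range(32)
def pvCtl : List Char := ['\x00', '\x01', '\x02', '\x03', '\x04', '\x05', '\x06', '\x07', '\x08', '\x09', '\x0a', '\x0b', '\x0c', '\x0d', '\x0e', '\x0f', '\x10', '\x11', '\x12', '\x13', '\x14', '\x15', '\x16', '\x17', '\x18', '\x19', '\x1a', '\x1b', '\x1c', '\x1d', '\x1e', '\x1f']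

theorem pv_char_eq_iff (c d : Char) : c = d ↔ c.toNat = d.toNat :=
  ⟨fun h => congrArg Char.toNat h, fun h => Char.ext (UInt32.toNat_inj.mp h)⟩

theorem pv_all32 (c : Char) :
    (pvCtl.all (fun a => c ≠ a) = true) ↔ ¬ c.toNat < 32 := by
  simp only [pvCtl, List.all_cons, List.all_nil, Bool.and_eq_true, decide_eq_true_eq, ne_eq,
    pv_char_eq_iff, and_true]
  have e0 : Char.toNat '\x00' = 0 := rfl
  have e1 : Char.toNat '\x01' = 1 := rfl
  have e2 : Char.toNat '\x02' = 2 := rfl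
  have e3 : Char.toNat '\x03' = 3 := rfl
  have e4 : Char.toNat '\x04' = 4 := rfl
  have e5 : Char.toNat '\x05' = 5 := rfl
  have e6 : Char.toNat '\x06' = 6 := rfl
  have e7 : Char.toNat '\x07' = 7 := rfl
  have e8 : Char.toNat '\x08' = 8 := rfl
  have e9 : Char.toNat '\x09' = 9 := rfl
  have e10 : Char.toNat '\x0a' = 10 := rfl
  have e11 : Char.toNat '\x0b' = 11 := rfl
  have e12 : Char.toNat '\x0c' = 12 := rfl
  have e13 : Char.toNat '\x0d' = 13 := rfl
  have e14 : Char.toNat '\x0e' = 14 := rfl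
  have e15 : Char.toNat '\x0f' = 15 := rfl
  have e16 : Char.toNat '\x10' = 16 := rfl
  have e17 : Char.toNat '\x11' = 17 := rfl
  have e18 : Char.toNat '\x12' = 18 := rfl
  have e19 : Char.toNat '\x13' = 19 := rfl
  have e20 : Char.toNat '\x14' = 20 := rfl
  have e21 : Char.toNat '\x15' = 21 := rfl
  have e22 : Char.toNat '\x16' = 22 := rfl
  have e23 : Char.toNat '\x17' = 23 := rfl
  have e24 : Char.toNat '\x18' = 24 := rfl
  have e25 : Char.toNat '\x19' = 25 := rfl
  have e26 : Char.toNat '\x1a' = 26 := rfl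
  have e27 : Char.toNat '\x1b' = 27 := rfl
  have e28 : Char.toNat '\x1c' = 28 := rfl
  have e29 : Char.toNat '\x1d' = 29 := rfl
  have e30 : Char.toNat '\x1e' = 30 := rfl
  have e31 : Char.toNat '\x1f' = 31 := rfl
  rw [e0, e1, e2, e3, e4, e5, e6, e7, e8, e9, e10, e11, e12, e13, e14, e15, e16, e17, e18, e19, e20, e21, e22, e23, e24, e25, e26, e27, e28, e29, e30, e31]
  omega

-- the residue of the two staged passes is filterMap pvTrashMap
theorem pv_filter_map_eq (t : List Char) :
    (t.filter (fun c => pvCtl.all (fun a => c ≠ a))).map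
        (fun c => ['\\', '/', ':', '*', '?', '"', '<', '>', '|', ' '].foldl
          (fun x a => if x = a then '_' else x) c)
      = t.filterMap pvTrashMap := by
  induction t with
  | nil => rfl
  | cons c t ih =>
    rw [List.filter_cons, List.filterMap_cons]
    by_cases h32 : c.toNat < 32
    · have hall : ¬ (pvCtl.all (fun a => c ≠ a) = true) := fun h => (pv_all32 c).mp h h32
      have hm : pvTrashMap c = none := by simp [pvTrashMap, h32]
      rw [if_neg (by simpa using hall), hm]
      exact ih
    · rw [if_pos (by simpa using (pv_all32 c).mpr h32), List.map_cons]
      by_cases hb : c ∈ ['\\', '/', ':', '*', '?', '"', '<', '>', '|', ' ']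
      · have hm : pvTrashMap c = some '_' := by
          simp [pvTrashMap, h32, List.contains_eq_mem, hb]
        rw [hm, pv_subst_mem _ _ (by decide) hb, ih]
      · have hm : pvTrashMap c = some c := by
          simp [pvTrashMap, h32, List.contains_eq_mem, hb]
        rw [hm, pv_subst_not_mem _ _ hb, ih]

-- B's two staged passes compute filterMap pvTrashMap (unconditionally)
theorem pv_stages_eq (s : List Char) :
    ['\\', '/', ':', '*', '?', '"', '<', '>', '|', ' '].foldl (fun s bad => pyReplaceChar s bad ['_'])
      ((PySem.List.pyRange 0 32 1).foldl (fun s code => pyReplaceChar s (Char.ofNat code.toNat) []) s)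
    = s.filterMap pvTrashMap := by
  have hm : (PySem.List.pyRange 0 32 1).map (fun code => Char.ofNat code.toNat) = pvCtl := by decide
  have h1 : (PySem.List.pyRange 0 32 1).foldl (fun s code => pyReplaceChar s (Char.ofNat code.toNat) []) s
      = pvCtl.foldl (fun s a => pyReplaceChar s a []) s := by
    rw [← hm, List.foldl_map]
  rw [h1, pv_fold_del, pv_fold_sub, pv_filter_map_eq]

-- ===== VERDICT (by name: the statement is the Claim_ definition above) =====
theorem trash_name_part_py_spec : Claim_equal_trash_name_part_py := by
  unfold Claim_equal_trash_name_part_py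
  intro value fallback hdom
  unfold Spec_trash_name_part_py trash_name_part_py trash_name_part_py_alt
  have hsrc := pv_src_dom value fallback hdom
  simp only at hsrc ⊢
  rw [pv_fold_eq _ _ hsrc, pv_stages_eq]
  simp
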